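-- pv_equiv track=rewrite | github.com/l1-ca0/EPI_Python_Illustrated | Dynamic Programming/search_sequence_no_repeats.py | search_sequence_no_repeats
-- ===== SOURCE A (Python) =====
-- def search_sequence_no_repeats(grid, pattern):
--     """
--     Checks if a pattern exists in a grid where a cell cannot be visited twice
--     in the same path
--     """
--     def backtrack_dfs(x, y, offset, visited):
--         """
--         Backtracking search that keeps track of visited cells for the current path
--         """
--         # Base Case: We've successfully matched the whole pattern
--         if offset == len(pattern):
--             return True
--
--         # Check for invalid moves
--         # Note that we don't need boundary checks
--         # if the caller ensures the first call is valid
--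
--         # Mark the current cell as visited for this path
--         visited.add((x, y))
--
--         # Explore neighbors
--         for dx, dy in [(0,1), (0,-1), (1,0), (-1,0)]:
--             next_x, next_y = x + dx, y + dy
--
--             # Check if neighbor is valid and not already visited
--             if (0 <= next_x < len(grid) and 0 <= next_y < len(grid[0]) and
--                 (next_x, next_y) not in visited and
--                 grid[next_x][next_y] == pattern[offset]):
--
--                 # If a path is found from the neighbor, we are done
--                 if backtrack_dfs(next_x, next_y, offset + 1, visited):
--                     return True
--
--         # Backtrack: Un-mark the cell so it can be used in other paths
--         visited.remove((x, y))
--         return False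
--
--     # Main Loop: Find a starting point
--     for i in range(len(grid)):
--         for j in range(len(grid[0])):
--             if grid[i][j] == pattern[0]:
--                 # Launch the search with the starting cell and an initial offset of 1
--                 if backtrack_dfs(i, j, 1, set()):
--                     return True
--     return False
-- ===== SOURCE B (Python) =====
-- def search_sequence_no_repeats(grid, pattern):
--     """
--     Checks if a pattern exists in a grid where a cell cannot be visited twice
--     in the same path (iterative worklist version: no recursion, no un-marking).
--     """
--     n = len(pattern)
--     stack = [(i, j, 1, frozenset())
--              for i in range(len(grid))
--              for j in range(len(grid[0]))
--              if grid[i][j] == pattern[0]]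
--     while stack:
--         x, y, offset, visited = stack.pop()
--         if offset == n:
--             return True
--         visited = visited | {(x, y)}
--         for nx, ny in ((x, y + 1), (x, y - 1), (x + 1, y), (x - 1, y)):
--             if (0 <= nx < len(grid) and 0 <= ny < len(grid[0])
--                     and (nx, ny) not in visited
--                     and grid[nx][ny] == pattern[offset]):
--                 stack.append((nx, ny, offset + 1, visited))
--     return False
-- ===== Notes on version B (the rewrite author's own statement) =====
-- stated objective: alternative
-- what changed: A's recursive backtracking helper with a single mutable visited set (add, recurse, remove) is replaced by an iterative worklist: a stack of frames (x, y, offset, visited-snapshot) seeded with all matching start cells, popped in a loop with no recursion and no un-marking (each frame carries its own immutable frozenset).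
-- outside the precondition, e.g. on search_sequence_no_repeats([[1, 2], [3]], [1]): A returns True, B raises IndexError
import Mathlib
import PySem

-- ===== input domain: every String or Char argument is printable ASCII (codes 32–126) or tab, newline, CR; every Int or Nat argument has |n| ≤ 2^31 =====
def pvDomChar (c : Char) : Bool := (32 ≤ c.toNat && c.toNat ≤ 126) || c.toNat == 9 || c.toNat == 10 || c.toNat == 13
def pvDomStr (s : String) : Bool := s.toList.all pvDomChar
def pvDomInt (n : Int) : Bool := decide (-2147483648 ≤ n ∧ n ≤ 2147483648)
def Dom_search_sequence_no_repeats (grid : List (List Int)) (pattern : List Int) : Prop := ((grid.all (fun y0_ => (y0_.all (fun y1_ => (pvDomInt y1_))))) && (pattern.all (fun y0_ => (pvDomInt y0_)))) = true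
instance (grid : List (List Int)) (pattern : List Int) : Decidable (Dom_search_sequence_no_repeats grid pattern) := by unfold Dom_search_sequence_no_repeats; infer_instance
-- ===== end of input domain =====

-- B replaces A's recursive mutable-visited backtracking by an iterative worklist (an explicit
-- stack of frames carrying per-frame visited snapshots): an alternative decomposition, not faster.


-- ===== PORT A =====
-- grid[x][y]: total stand-in; exact whenever both indices are in range (guaranteed by the
-- guards of both programs together with Pre_'s row-length condition).
def pvGridAt (grid : List (List Int)) (x y : Int) : Int :=
  PySem.List.pyGetD (PySem.List.pyGetD grid x []) y 0

def pvDirs : List (Int × Int) := [(0, 1), (0, -1), (1, 0), (-1, 0)]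

-- backtrack_dfs: the mutable 'visited' set is threaded functionally; a call that returns False
-- restores visited in Python, so passing visited' only downward is exact. The dead
-- 'offset > len(pattern)' branch (unreachable in Python: offset ≤ len always) makes it total.
def pvBacktrack (grid : List (List Int)) (pattern : List Int) (x y : Int) (offset : Nat)
    (visited : PySem.Set (Int × Int)) : Bool :=
  if _h : pattern.length ≤ offset then offset == pattern.length
  else
    let visited' := PySem.Set.add visited (x, y)
    pvDirs.any (fun d =>
      let nx := x + d.1
      let ny := y + d.2
      if (decide (0 ≤ nx) && decide (nx < PySem.List.len grid) &&
          decide (0 ≤ ny) && decide (ny < PySem.List.len (grid.headD [])) &&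
          !(PySem.Set.contains visited' (nx, ny)) &&
          (pvGridAt grid nx ny == PySem.List.pyGetD pattern offset 0))
      then pvBacktrack grid pattern nx ny (offset + 1) visited'
      else false)
termination_by pattern.length - offset
decreasing_by omega

def search_sequence_no_repeats (grid : List (List Int)) (pattern : List Int) : Bool :=
  (PySem.List.pyRange 0 (PySem.List.len grid) 1).any (fun i =>
    (PySem.List.pyRange 0 (PySem.List.len (grid.headD [])) 1).any (fun j =>
      if pvGridAt grid i j == PySem.List.pyGetD pattern 0 0
      then pvBacktrack grid pattern i j 1 PySem.Set.empty
      else false))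

-- ===== PORT B =====
-- weight of one worklist frame, used only for termination of the loop below
def pvFrameW (n : Nat) (f : Int × Int × Nat × PySem.Set (Int × Int)) : Nat := 5 ^ (n - f.2.2.1)

-- termination helper: a constant-valued map sums to length * constant
lemma pvSumConst {α : Type} (l : List α) (c : Nat) : (l.map (fun _ => c)).sum = l.length * c := by
  induction l with
  | nil => simp
  | cons a t ih => simp [Nat.succ_mul, Nat.add_comm]

-- the while loop of Source B: the stack is a list with its TOP at the HEAD (Python pops from the
-- end of the list, so this is Python's stack reversed; hence pushes go on in reverse order).
-- The 'pattern.length ≤ offset' dichotomy is a totality guard: in Python offset ≤ len(pattern)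
-- always holds, and there the branch computes exactly Python's 'if offset == n: return True'.
def pvLoop (grid : List (List Int)) (pattern : List Int) :
    List (Int × Int × Nat × PySem.Set (Int × Int)) → Bool
  | [] => false
  | (x, y, offset, visited) :: rest =>
    if _h : pattern.length ≤ offset then
      if offset == pattern.length then true else pvLoop grid pattern rest
    else
      let visited' := PySem.Set.add visited (x, y)
      let pushes := ([(x, y + 1), (x, y - 1), (x + 1, y), (x - 1, y)].filter (fun c =>
          decide (0 ≤ c.1) && decide (c.1 < PySem.List.len grid) &&
          decide (0 ≤ c.2) && decide (c.2 < PySem.List.len (grid.headD [])) &&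
          !(PySem.Set.contains visited' c) &&
          (pvGridAt grid c.1 c.2 == PySem.List.pyGetD pattern offset 0))).map
        (fun c => (c.1, c.2, offset + 1, visited'))
      pvLoop grid pattern (pushes.reverse ++ rest)
termination_by st => (st.map (pvFrameW pattern.length)).sum
decreasing_by
  · simp only [List.map_cons, List.sum_cons]
    have h5 : 0 < 5 ^ (pattern.length - offset) := Nat.pow_pos (by norm_num)
    simp only [pvFrameW]
    omega
  · simp only [List.map_cons, List.sum_cons, List.map_append, List.sum_append,
      List.map_reverse, List.sum_reverse, List.map_map]
    have hlen : (([(x, y + 1), (x, y - 1), (x + 1, y), (x - 1, y)].filter (fun c =>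
          decide (0 ≤ c.1) && decide (c.1 < PySem.List.len grid) &&
          decide (0 ≤ c.2) && decide (c.2 < PySem.List.len (grid.headD [])) &&
          !(PySem.Set.contains visited' c) &&
          (pvGridAt grid c.1 c.2 == PySem.List.pyGetD pattern offset 0)))).length ≤ 4 := by
      have := List.length_filter_le (fun c =>
          decide (0 ≤ c.1) && decide (c.1 < PySem.List.len grid) &&
          decide (0 ≤ c.2) && decide (c.2 < PySem.List.len (grid.headD [])) &&
          !(PySem.Set.contains visited' c) &&
          (pvGridAt grid c.1 c.2 == PySem.List.pyGetD pattern offset 0))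
        [(x, y + 1), (x, y - 1), (x + 1, y), (x - 1, y)]
      simpa using this
    have hmap : (pvFrameW pattern.length ∘ fun c : Int × Int => (c.1, c.2, offset + 1, visited'))
        = fun _ => 5 ^ (pattern.length - (offset + 1)) := by
      funext c; rfl
    rw [hmap, pvSumConst]
    have hk : pattern.length - offset = (pattern.length - (offset + 1)) + 1 := by omega
    have h5 : 0 < 5 ^ (pattern.length - (offset + 1)) := Nat.pow_pos (by norm_num)
    rw [pvFrameW, hk, pow_succ]
    nlinarith [hlen, h5]

def search_sequence_no_repeats_alt (grid : List (List Int)) (pattern : List Int) : Bool :=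
  -- the start-frame comprehension; len(grid[0]) is only evaluated when grid has a row, and
  -- for grid = [] the range is empty either way, so headD [] is exact here.
  let start := (PySem.List.pyRange 0 (PySem.List.len grid) 1).flatMap (fun i =>
    ((PySem.List.pyRange 0 (PySem.List.len (grid.headD [])) 1).filter (fun j =>
      pvGridAt grid i j == PySem.List.pyGetD pattern 0 0)).map
      (fun j => ((i : Int), (j : Int), (1 : Nat), (PySem.Set.empty : PySem.Set (Int × Int)))))
  pvLoop grid pattern start.reverse

-- ===== PRECONDITION & SPEC =====
-- Pre_ excludes exactly (a) empty pattern with a non-empty first row (pattern[0] raises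
-- IndexError in both programs) and (b) grids with a row shorter than row 0 (both scan
-- grid[i][j] for j < len(grid[0]); A raises unless a match is found first — this over-excludes
-- a few ragged inputs on which A happens to return True early; see the cite in claim.json).
def Pre_search_sequence_no_repeats (grid : List (List Int)) (pattern : List Int) : Prop :=
  (pattern ≠ [] ∨ grid = [] ∨ grid.headD [] = []) ∧
  (∀ row ∈ grid, (grid.headD []).length ≤ row.length)
instance (grid : List (List Int)) (pattern : List Int) : Decidable (Pre_search_sequence_no_repeats grid pattern) := by unfold Pre_search_sequence_no_repeats; infer_instance

def pvWitness_search_sequence_no_repeats : List (List Int) × List Int :=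
  ([[1, 2], [3, 4]], [1, 2, 4])

def Spec_search_sequence_no_repeats (grid : List (List Int)) (pattern : List Int) (out : Bool) : Prop := out = search_sequence_no_repeats_alt grid pattern
instance (grid : List (List Int)) (pattern : List Int) (out : Bool) : Decidable (Spec_search_sequence_no_repeats grid pattern out) := by unfold Spec_search_sequence_no_repeats; infer_instance

-- ===== CLAIM (what is proved, stated in full; the proofs are below) =====
def Claim_equal_search_sequence_no_repeats : Prop := ∀ (grid : List (List Int)) (pattern : List Int), Dom_search_sequence_no_repeats grid pattern → Pre_search_sequence_no_repeats grid pattern → Spec_search_sequence_no_repeats grid pattern (search_sequence_no_repeats grid pattern)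

-- ===== LEMMAS AND PROOFS =====

lemma pvIf (c b : Bool) : (if c = true then b else false) = (c && b) := by
  cases c <;> simp

-- the worklist returns true iff some frame on it starts a successful backtracking search
lemma pvLoop_any (grid : List (List Int)) (pattern : List Int)
    (st : List (Int × Int × Nat × PySem.Set (Int × Int))) :
    pvLoop grid pattern st
      = st.any (fun f => pvBacktrack grid pattern f.1 f.2.1 f.2.2.1 f.2.2.2) := by
  induction st using pvLoop.induct grid pattern with
  | case1 => simp [pvLoop]
  | case2 x y offset visited rest h heq =>
    have hb : pvBacktrack grid pattern x y offset visited = (offset == pattern.length) := by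
      unfold pvBacktrack; rw [dif_pos h]
    unfold pvLoop
    rw [dif_pos h, if_pos heq]
    simp [List.any_cons, hb, heq]
  | case3 x y offset visited rest h hne ih =>
    have hb : pvBacktrack grid pattern x y offset visited = (offset == pattern.length) := by
      unfold pvBacktrack; rw [dif_pos h]
    have hf : (offset == pattern.length) = false := by
      cases hx : (offset == pattern.length) with
      | true => exact absurd hx hne
      | false => rfl
    unfold pvLoop
    rw [dif_pos h, if_neg hne]
    simp only [List.any_cons, hb, hf, Bool.false_or, ih]
  | case4 x y offset visited rest h vis push =>
    rename_i ih
    have hb : pvBacktrack grid pattern x y offset visited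
        = pvDirs.any (fun d =>
            let nx := x + d.1
            let ny := y + d.2
            if (decide (0 ≤ nx) && decide (nx < PySem.List.len grid) &&
                decide (0 ≤ ny) && decide (ny < PySem.List.len (grid.headD [])) &&
                !(PySem.Set.contains (PySem.Set.add visited (x, y)) (nx, ny)) &&
                (pvGridAt grid nx ny == PySem.List.pyGetD pattern offset 0))
            then pvBacktrack grid pattern nx ny (offset + 1) (PySem.Set.add visited (x, y))
            else false) := by
      conv_lhs => rw [pvBacktrack]
      rw [dif_neg h]
    unfold pvLoop
    rw [dif_neg h]
    simp only [List.any_cons]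
    rw [ih, List.any_append, List.any_reverse, List.any_map, List.any_filter, hb]
    simp only [pvDirs, List.any_cons, List.any_nil, pvIf, Function.comp,
      Int.sub_eq_add_neg, add_zero]
    rfl

-- ===== VERDICT (by name: the statement is the Claim_ definition above) =====
theorem search_sequence_no_repeats_spec : Claim_equal_search_sequence_no_repeats := by
  intro grid pattern _ _
  unfold Spec_search_sequence_no_repeats search_sequence_no_repeats search_sequence_no_repeats_alt
  rw [pvLoop_any, List.any_reverse]
  simp only [List.any_flatMap, List.any_map, List.any_filter, pvIf]
  rfl
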